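-- pv_equiv track=rewrite | github.com/FanWangEcon/PrjForInfCreditVilFW | prjforinfcreditvilfw/parameters/parse_combo_type.py | parse_combo_type_e_check
-- ===== SOURCE A (Python) =====
-- def get_connector():
--     st_connector = "="
--     return st_connector
--
-- def parse_combo_type_e_check(combo_type_e):
--     """
--     Check combo_type's fifth element to see if it follows the structure of combo_type_e for esr sequence element
--     call, or it is a simulation call's JSON file specification.
--
--     Parameters
--     ----------
--     combo_type_e : str
--         'C1E126M4S3=2' for ESR path call during estimation.
--         "M4S3_top_json.json" for simulation call to JSON file.
--     """
--
--     st_connector = get_connector()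
--     ls_combo_type_e_split = combo_type_e.split(st_connector)
--     # first check length
--     bl_esr_json = True
--     if len(ls_combo_type_e_split) == 2:
--         [compesti_short_name, esti_top_which] = ls_combo_type_e_split
--         # check type
--         bl_first_is_str = isinstance(compesti_short_name, str)
--         bl_second_is_int = all([st_ele in '1234567890' for st_ele in esti_top_which])
--         if bl_first_is_str + bl_second_is_int < 2:
--             bl_esr_json = False
--     else:
--         bl_esr_json = False
--
--     return bl_esr_json
-- ===== SOURCE B (Python) =====
-- def parse_combo_type_e_check(combo_type_e):
--     # Single left-to-right scan (two-state automaton) instead of split-then-scan: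
--     # before the first '=' any char is fine; after it only digits may follow,
--     # and a second '=' (or any non-digit) rejects immediately.
--     seen_eq = False
--     for ch in combo_type_e:
--         if not seen_eq:
--             seen_eq = ch == "="
--         else:
--             if ch == "=" or ch not in "0123456789":
--                 return False
--     return seen_eq
-- ===== Notes on version B (the rewrite author's own statement) =====
-- stated objective: simpler
-- what changed: B replaces A's split-on-'='-then-check-length-then-scan-the-second-part with a single left-to-right two-state scan that rejects on a second '=' or a non-digit after the '=', never building the split list.
import Mathlib
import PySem

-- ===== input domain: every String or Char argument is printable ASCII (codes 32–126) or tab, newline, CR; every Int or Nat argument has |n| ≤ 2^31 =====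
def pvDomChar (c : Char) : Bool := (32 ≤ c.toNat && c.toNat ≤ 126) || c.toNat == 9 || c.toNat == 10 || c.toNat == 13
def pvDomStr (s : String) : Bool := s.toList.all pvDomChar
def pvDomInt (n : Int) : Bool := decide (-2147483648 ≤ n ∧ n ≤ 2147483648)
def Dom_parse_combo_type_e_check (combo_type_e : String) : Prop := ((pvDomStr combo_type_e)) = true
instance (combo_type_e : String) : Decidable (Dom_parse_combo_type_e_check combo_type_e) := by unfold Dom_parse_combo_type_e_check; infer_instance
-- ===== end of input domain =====

-- B replaces A's split-on-'=' / length-check / digit-scan with a single two-state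
-- left-to-right scan; same value on every string, objective: simpler.


-- ===== PORT A =====
-- get_connector() returns "="
def pvGetConnector : List Char := ['=']

def parse_combo_type_e_check (combo_type_e : String) : Bool :=
  match PySem.Chars.splitOn combo_type_e.toList pvGetConnector with
  | [_compesti_short_name, esti_top_which] =>
      -- isinstance(compesti_short_name, str) is True
      let bl_first_is_str : Bool := true
      -- all([st_ele in '1234567890' for st_ele in esti_top_which])
      let bl_second_is_int : Bool :=
        esti_top_which.all (fun c => PySem.Chars.isIn [c] "1234567890".toList)
      if bl_first_is_str.toNat + bl_second_is_int.toNat < 2 then false else true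
  | _ => false          -- len(split) ≠ 2: bl_esr_json stays/becomes False

-- ===== PORT B =====
def pvDfa : List Char → Bool → Bool
  | [], seen_eq => seen_eq
  | c :: rest, false => pvDfa rest (c == '=')
  | c :: rest, true =>
      if c == '=' || !(PySem.Chars.isIn [c] "0123456789".toList) then false
      else pvDfa rest true

def parse_combo_type_e_check_alt (combo_type_e : String) : Bool :=
  pvDfa combo_type_e.toList false

-- ===== PRECONDITION & SPEC =====
def Spec_parse_combo_type_e_check (combo_type_e : String) (out : Bool) : Prop := out = parse_combo_type_e_check_alt combo_type_e
instance (combo_type_e : String) (out : Bool) : Decidable (Spec_parse_combo_type_e_check combo_type_e out) := by unfold Spec_parse_combo_type_e_check; infer_instance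

-- ===== CLAIM (what is proved, stated in full; the proofs are below) =====
def Claim_equal_parse_combo_type_e_check : Prop := ∀ (combo_type_e : String), Dom_parse_combo_type_e_check combo_type_e → Spec_parse_combo_type_e_check combo_type_e (parse_combo_type_e_check combo_type_e)

-- ===== LEMMAS AND PROOFS =====

-- structural recursion computing split("=") character by character
def pvSplitEq : List Char → List (List Char)
  | [] => [[]]
  | c :: r => if c = '=' then [] :: pvSplitEq r else (pvSplitEq r).modifyHead (c :: ·)

theorem pvSplitEq_cons (l : List Char) : ∃ hd tl, pvSplitEq l = hd :: tl := by
  induction l with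
  | nil => exact ⟨[], [], rfl⟩
  | cons c r ih =>
    obtain ⟨hd, tl, hsp⟩ := ih
    by_cases hc : c = '='
    · exact ⟨[], pvSplitEq r, by simp [pvSplitEq, hc]⟩
    · exact ⟨c :: hd, tl, by simp [pvSplitEq, hc, hsp, List.modifyHead]⟩

theorem pvSplitOn_go_eq : ∀ (fuel : Nat) (l cur : List Char) (acc : List (List Char)),
    l.length < fuel →
    PySem.Chars.splitOn.go ['='] fuel l cur acc
      = acc.reverse ++ (pvSplitEq l).modifyHead (cur.reverse ++ ·) := by
  intro fuel
  induction fuel with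
  | zero => intro l cur acc h; omega
  | succ f ih =>
    intro l cur acc h
    cases l with
    | nil =>
      simp [PySem.Chars.splitOn.go, pvSplitEq, List.modifyHead]
    | cons c rest =>
      obtain ⟨hd, tl, hsp⟩ := pvSplitEq_cons rest
      by_cases hc : c = '='
      · subst hc
        rw [show PySem.Chars.splitOn.go ['='] (f+1) ('=' :: rest) cur acc
              = PySem.Chars.splitOn.go ['='] f rest [] (cur.reverse :: acc) by
            simp [PySem.Chars.splitOn.go, List.isPrefixOf]]
        rw [ih rest [] (cur.reverse :: acc) (by simpa using Nat.lt_of_succ_lt_succ h)]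
        simp [pvSplitEq, hsp, List.modifyHead]
      · rw [show PySem.Chars.splitOn.go ['='] (f+1) (c :: rest) cur acc
              = PySem.Chars.splitOn.go ['='] f rest (c :: cur) acc by
            simp [PySem.Chars.splitOn.go, List.isPrefixOf, Ne.symm hc]]
        rw [ih rest (c :: cur) acc (by simpa using Nat.lt_of_succ_lt_succ h)]
        simp [pvSplitEq, hc, hsp, List.modifyHead]

theorem pvSplitOn_eq (l : List Char) : PySem.Chars.splitOn l ['='] = pvSplitEq l := by
  unfold PySem.Chars.splitOn
  rw [pvSplitOn_go_eq (l.length + 1) l [] [] (by omega)]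
  obtain ⟨hd, tl, hsp⟩ := pvSplitEq_cons l
  simp [hsp, List.modifyHead]

theorem pv_isIn_singleton (c : Char) (l : List Char) :
    PySem.Chars.isIn [c] l = l.contains c := by
  rcases h : l.contains c with _ | _
  · rw [PySem.Chars.isIn_eq_false_iff]
    intro hin
    have : c ∈ l := hin.subset (by simp)
    simp [this] at h
  · rw [PySem.Chars.isIn_iff_infix]
    have hc : c ∈ l := by simpa using h
    obtain ⟨s, t, rfl⟩ := List.append_of_mem hc
    exact ⟨s, t, by simp⟩

theorem pv_digit_eq (c : Char) :
    PySem.Chars.isIn [c] "1234567890".toList = PySem.Chars.isIn [c] "0123456789".toList := by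
  rw [pv_isIn_singleton, pv_isIn_singleton,
    show "1234567890".toList = ['1','2','3','4','5','6','7','8','9','0'] from rfl,
    show "0123456789".toList = ['0','1','2','3','4','5','6','7','8','9'] from rfl,
    Bool.eq_iff_iff]
  simp
  tauto

theorem pvDfa_true (r : List Char) :
    pvDfa r true = (match pvSplitEq r with
                    | [b] => b.all (fun c => PySem.Chars.isIn [c] "0123456789".toList)
                    | _ => false) := by
  induction r with
  | nil => simp [pvDfa, pvSplitEq]
  | cons c t ih =>
    obtain ⟨hd, tl, hsp⟩ := pvSplitEq_cons t
    by_cases hc : c = '='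
    · subst hc
      simp [pvDfa, pvSplitEq, hsp]
    · have hcne : (c == '=') = false := by simp [hc]
      have hsplit : pvSplitEq (c :: t) = (pvSplitEq t).modifyHead (c :: ·) := by
        simp [pvSplitEq, hc]
      rcases hdig : PySem.Chars.isIn [c] ['0','1','2','3','4','5','6','7','8','9'] with _ | _
      · rw [show pvDfa (c :: t) true = false by simp [pvDfa, hcne, hdig], hsplit, hsp]
        cases tl with
        | nil => simp [List.modifyHead, List.all_cons, hdig]
        | cons x xs => simp [List.modifyHead]
      · rw [show pvDfa (c :: t) true = pvDfa t true by simp [pvDfa, hcne, hdig], ih, hsplit, hsp]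
        cases tl with
        | nil => simp [List.modifyHead, List.all_cons, hdig]
        | cons x xs => simp [List.modifyHead]

theorem pvDfa_false (r : List Char) :
    pvDfa r false = (match pvSplitEq r with
                     | [_, b] => b.all (fun c => PySem.Chars.isIn [c] "0123456789".toList)
                     | _ => false) := by
  induction r with
  | nil => simp [pvDfa, pvSplitEq]
  | cons c t ih =>
    obtain ⟨hd, tl, hsp⟩ := pvSplitEq_cons t
    by_cases hc : c = '='
    · subst hc
      rw [show pvDfa ('=' :: t) false = pvDfa t true by simp [pvDfa]]
      rw [pvDfa_true t, show pvSplitEq ('=' :: t) = [] :: pvSplitEq t by simp [pvSplitEq]]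
      rw [hsp]
      cases tl <;> rfl
    · have hcne : (c == '=') = false := by simp [hc]
      rw [show pvDfa (c :: t) false = pvDfa t false by simp [pvDfa, hcne]]
      rw [ih, show pvSplitEq (c :: t) = (pvSplitEq t).modifyHead (c :: ·) by
        simp [pvSplitEq, hc]]
      rw [hsp]
      cases tl with
      | nil => rfl
      | cons x xs => cases xs <;> rfl

-- ===== VERDICT (by name: the statement is the Claim_ definition above) =====
theorem parse_combo_type_e_check_spec : Claim_equal_parse_combo_type_e_check := by
  intro s _
  unfold Spec_parse_combo_type_e_check parse_combo_type_e_check parse_combo_type_e_check_alt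
    pvGetConnector
  rw [pvDfa_false, pvSplitOn_eq]
  obtain ⟨hd, tl, hsp⟩ := pvSplitEq_cons s.toList
  rw [hsp]
  cases tl with
  | nil => rfl
  | cons b tl2 =>
    cases tl2 with
    | nil =>
      have hcongr : (b.all fun c => PySem.Chars.isIn [c] "1234567890".toList)
           = (b.all fun c => PySem.Chars.isIn [c] "0123456789".toList) := by
        exact List.all_congr rfl (fun c => pv_digit_eq c)
      cases hall : b.all (fun c => PySem.Chars.isIn [c] "0123456789".toList) <;>
        simp only [hcongr, hall] <;> rfl
    | cons _ _ => rfl
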